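-- pv_equiv track=rewrite | github.com/ellada-py/ellada22-23 | 11/EGE/sofa/16.py | f
-- ===== SOURCE A (Python) =====
-- def f (x):
--     if x<3:
--         return 1
--     if (x >2) and(x%2==1):
--         return f(x-1)+f(x-2)
--     if (x >2) and(x%2==0):
--         sum=0
--         for i in range (1,x):
--             sum+=f(i)
--         return sum
-- ===== SOURCE B (Python) =====
-- def f(x):
--     # Bottom-up: keep only the last two values and the running prefix sum,
--     # instead of A's exponential recursion.
--     if x < 3:
--         return 1
--     a, b = 1, 1        # f(i-2), f(i-1)
--     prefix = 2         # f(1) + ... + f(i-1)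
--     for i in range(3, x + 1):
--         v = a + b if i % 2 == 1 else prefix
--         a, b = b, v
--         prefix += v
--     return b
-- ===== Notes on version B (the rewrite author's own statement) =====
-- stated objective: faster
-- what changed: Replaced the exponential branching recursion (odd: f(x-1)+f(x-2); even: sum of all previous f) by a single bottom-up loop carrying the last two values and a running prefix sum; intended as faster (measured: A timed out at n=16 where B answered in under a millisecond).
import Mathlib
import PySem

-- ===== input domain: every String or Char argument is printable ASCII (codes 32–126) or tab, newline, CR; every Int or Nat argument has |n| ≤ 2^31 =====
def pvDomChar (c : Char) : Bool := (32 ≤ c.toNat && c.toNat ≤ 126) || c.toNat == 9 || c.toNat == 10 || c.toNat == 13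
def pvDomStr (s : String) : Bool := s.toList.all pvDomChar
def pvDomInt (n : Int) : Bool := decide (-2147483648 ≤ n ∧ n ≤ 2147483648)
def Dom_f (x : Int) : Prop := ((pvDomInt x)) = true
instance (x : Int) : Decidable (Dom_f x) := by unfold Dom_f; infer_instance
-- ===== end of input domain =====

-- B replaces A's exponential recursion by one bottom-up pass with a running prefix sum; intended as faster (measured: A timed out at n=16 where B returned in under a millisecond).

-- ===== PORT A =====
-- Literal port of A's recursion; the unreachable fall-through (Python would return None,
-- but x ≥ 3 always has parity 0 or 1 so it is never taken) is written as 0.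
def f (x : Int) : Int :=
  if x < 3 then 1
  else if x > 2 ∧ PySem.Int.mod x 2 = 1 then f (x - 1) + f (x - 2)
  else if x > 2 ∧ PySem.Int.mod x 2 = 0 then
    (PySem.List.pyRange 1 x 1).attach.foldl (fun s i => s + f i.1) 0
  else 0
termination_by x.toNat
decreasing_by
  all_goals first
    | omega
    | (have h := PySem.List.mem_pyRange_one.1 i.2; omega)

-- ===== PORT B =====
def f_alt (x : Int) : Int :=
  if x < 3 then 1
  else
    (((PySem.List.pyRange 3 (x + 1) 1).foldl
      (fun (st : Int × Int × Int) i =>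
        let v := if PySem.Int.mod i 2 = 1 then st.1 + st.2.1 else st.2.2
        (st.2.1, v, st.2.2 + v)) (1, 1, 2)).2.1)

-- ===== PRECONDITION & SPEC =====
def Spec_f (x : Int) (out : Int) : Prop := out = f_alt x
instance (x : Int) (out : Int) : Decidable (Spec_f x out) := by unfold Spec_f; infer_instance

-- ===== CLAIM (what is proved, stated in full; the proofs are below) =====
def Claim_equal_f : Prop := ∀ (x : Int), Dom_f x → Spec_f x (f x)

-- ===== LEMMAS AND PROOFS =====

theorem f_lt3 (x : Int) (h : x < 3) : f x = 1 := by
  rw [f]; simp [h]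

theorem f_odd (x : Int) (h : 3 ≤ x) (ho : x % 2 = 1) : f x = f (x - 1) + f (x - 2) := by
  rw [f]
  rw [PySem.Int.mod_eq_emod_of_pos (by omega)]
  simp only [if_neg (by omega : ¬ x < 3)]
  rw [if_pos ⟨by omega, ho⟩]

theorem f_even (x : Int) (h : 3 ≤ x) (he : x % 2 = 0) :
    f x = (PySem.List.pyRange 1 x 1).foldl (fun s i => s + f i) 0 := by
  rw [f]
  rw [PySem.Int.mod_eq_emod_of_pos (by omega)]
  simp only [if_neg (by omega : ¬ x < 3)]
  rw [if_neg (by omega), if_pos ⟨by omega, he⟩]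
  simp

theorem loop_inv (n : Int) (hn : 2 ≤ n) :
    (PySem.List.pyRange 3 (n + 1) 1).foldl
      (fun (st : Int × Int × Int) i =>
        let v := if PySem.Int.mod i 2 = 1 then st.1 + st.2.1 else st.2.2
        (st.2.1, v, st.2.2 + v)) (1, 1, 2)
    = (f (n - 1), f n, (PySem.List.pyRange 1 (n + 1) 1).foldl (fun s i => s + f i) 0) := by
  induction n, hn using Int.le_induction with
  | base =>
    have h1 : PySem.List.pyRange 3 (2 + 1) 1 = [] := by decide
    have h2 : PySem.List.pyRange 1 (2 + 1) 1 = [1, 2] := by decide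
    rw [h1, h2]
    norm_num [f_lt3 1 (by omega), f_lt3 2 (by omega)]
  | succ n hn ih =>
    rw [show n + 1 + 1 = (n + 1) + 1 by ring,
        PySem.List.pyRange_one_succ_right (by omega : (3:Int) ≤ n + 1),
        List.foldl_append, ih]
    have hmod : PySem.Int.mod (n + 1) 2 = (n + 1) % 2 :=
      PySem.Int.mod_eq_emod_of_pos (by omega)
    by_cases hpar : (n + 1) % 2 = 1
    · have hf : f (n + 1) = f n + f (n - 1) := by
        have h := f_odd (n + 1) (by omega) hpar
        have e2 : n + 1 - 2 = n - 1 := by ring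
        have e1 : n + 1 - 1 = n := by ring
        rw [e1, e2] at h; exact h
      have e1 : n + 1 - 1 = n := by ring
      rw [PySem.List.pyRange_one_succ_right (by omega : (1:Int) ≤ n + 1)]
      simp only [List.foldl_cons, List.foldl_nil, List.foldl_append, hmod, hpar, if_pos,
        Prod.mk.injEq, e1]
      refine ⟨trivial, by rw [hf]; ring, by rw [hf]; ring⟩
    · have hpar0 : (n + 1) % 2 = 0 := by omega
      have hf : f (n + 1) = (PySem.List.pyRange 1 (n + 1) 1).foldl (fun s i => s + f i) 0 :=
        f_even (n + 1) (by omega) hpar0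
      have e1 : n + 1 - 1 = n := by ring
      rw [PySem.List.pyRange_one_succ_right (by omega : (1:Int) ≤ n + 1)]
      simp only [List.foldl_cons, List.foldl_nil, List.foldl_append, hmod, hpar0,
        Prod.mk.injEq, e1]
      refine ⟨trivial, hf.symm, by simp [hf]⟩

-- ===== VERDICT (by name: the statement is the Claim_ definition above) =====
theorem f_spec : Claim_equal_f := by
  intro x _
  unfold Spec_f f_alt
  by_cases h : x < 3
  · rw [if_pos h, f_lt3 x h]
  · rw [if_neg h, loop_inv x (by omega)]
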